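-- pv_equiv track=rewrite | github.com/komiwalnut/Py2048 | main.py | get_max_digit_length
-- ===== SOURCE A (Python) =====
-- def get_max_digit_length(board):
--     """Finds the longest digit length in the board."""
--     max_length = 1
--     for row in board:
--         for cell in row:
--             if cell > 0:
--                 digit_length = len(str(cell))
--                 max_length = max(max_length, digit_length)
--     return max_length
-- ===== SOURCE B (Python) =====
-- def get_max_digit_length(board):
--     """Finds the longest digit length in the board."""
--     m = max((cell for row in board for cell in row if cell > 0), default=0)
--     return max(1, len(str(m)))
-- ===== Notes on version B (the rewrite author's own statement) =====
-- stated objective: faster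
-- what changed: Instead of converting every positive cell to a string and tracking the running maximum digit length, B tracks only the maximum positive cell value and converts that single value to a string once at the end (digit length is monotone in positive magnitude).
import Mathlib
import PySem

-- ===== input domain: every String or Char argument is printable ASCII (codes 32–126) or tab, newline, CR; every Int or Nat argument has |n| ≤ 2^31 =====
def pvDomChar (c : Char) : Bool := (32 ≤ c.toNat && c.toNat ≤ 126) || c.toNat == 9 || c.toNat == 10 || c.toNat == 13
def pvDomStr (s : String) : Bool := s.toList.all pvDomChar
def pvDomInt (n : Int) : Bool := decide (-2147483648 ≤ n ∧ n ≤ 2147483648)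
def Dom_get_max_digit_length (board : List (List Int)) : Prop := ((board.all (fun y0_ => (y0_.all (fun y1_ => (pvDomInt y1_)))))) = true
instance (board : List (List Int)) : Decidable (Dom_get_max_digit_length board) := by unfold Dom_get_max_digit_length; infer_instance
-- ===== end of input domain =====

-- B tracks the maximum positive cell value and computes the digit length once at the end
-- (digit length is monotone in positive magnitude), instead of one str() per positive cell.


-- ===== PORT A =====
def get_max_digit_length (board : List (List Int)) : Int :=
  board.foldl (fun max_length row =>
    row.foldl (fun max_length cell =>
      if cell > 0 then
        max max_length (PySem.Str.len (PySem.Int.toStr cell))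
      else max_length) max_length) 1

-- ===== PORT B =====
def get_max_digit_length_alt (board : List (List Int)) : Int :=
  let m := (board.flatMap (fun row => row.filter (fun cell => cell > 0))).foldl max 0
  max 1 (PySem.Str.len (PySem.Int.toStr m))

-- ===== PRECONDITION & SPEC =====
def Spec_get_max_digit_length (board : List (List Int)) (out : Int) : Prop := out = get_max_digit_length_alt board
instance (board : List (List Int)) (out : Int) : Decidable (Spec_get_max_digit_length board out) := by unfold Spec_get_max_digit_length; infer_instance

-- ===== CLAIM (what is proved, stated in full; the proofs are below) =====
def Claim_equal_get_max_digit_length : Prop := ∀ (board : List (List Int)), Dom_get_max_digit_length board → Spec_get_max_digit_length board (get_max_digit_length board)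

-- ===== LEMMAS AND PROOFS =====

-- digit length of a nonnegative number, as a Nat-level function
def pvL (n : Nat) : Nat := (Nat.toDigits 10 n).length

theorem pv_tdc_fuel : ∀ (f1 : Nat) (f2 n : Nat) (l : List Char), n < f1 → n < f2 →
    Nat.toDigitsCore 10 f1 n l = Nat.toDigitsCore 10 f2 n l := by
  intro f1
  induction f1 with
  | zero => intro f2 n l h; omega
  | succ f ih =>
    intro f2 n l h1 h2
    cases f2 with
    | zero => omega
    | succ g =>
      simp only [Nat.toDigitsCore]
      by_cases h : n / 10 = 0
      · simp [h]
      · simp only [h, if_false]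
        have hn : 10 ≤ n := by omega
        have hd : n / 10 < n := Nat.div_lt_self (by omega) (by omega)
        exact ih g (n / 10) _ (by omega) (by omega)

theorem pvL_def (n : Nat) : pvL n = if n < 10 then 1 else pvL (n / 10) + 1 := by
  unfold pvL Nat.toDigits
  by_cases h : n < 10
  · have h0 : n / 10 = 0 := Nat.div_eq_of_lt h
    simp [Nat.toDigitsCore, h0, h]
  · have h0 : n / 10 ≠ 0 := by
      intro hc; exact h (by omega)
    have hd : n / 10 < n := Nat.div_lt_self (by omega) (by omega)
    simp only [Nat.toDigitsCore, h0, if_false, h]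
    rw [pv_tdc_fuel n (n / 10 + 1) (n / 10) [Nat.digitChar (n % 10)] (by omega) (by omega),
      Nat.toDigitsCore_lens_eq 10 (n / 10 + 1) (n / 10) (Nat.digitChar (n % 10)) []]
    simp only [Nat.toDigitsCore]

theorem pvL_pos (n : Nat) : 1 ≤ pvL n := by
  rw [pvL_def]
  split <;> omega

theorem pvL_mono : ∀ (b a : Nat), a ≤ b → pvL a ≤ pvL b := by
  intro b
  induction b using Nat.strong_induction_on with
  | _ b ih =>
    intro a hab
    by_cases hb : b < 10
    · rw [pvL_def a, pvL_def b]
      simp [hb, show a < 10 by omega]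
    · by_cases ha : a < 10
      · rw [pvL_def a]
        simp only [ha, if_true]
        exact pvL_pos b
      · rw [pvL_def a, pvL_def b]
        simp only [ha, hb, if_false]
        have : a / 10 ≤ b / 10 := Nat.div_le_div_right hab
        have hlt : b / 10 < b := Nat.div_lt_self (by omega) (by omega)
        exact Nat.add_le_add_right (ih (b / 10) hlt (a / 10) this) 1

-- digit length at the Int level (value of PySem.Str.len (PySem.Int.toStr c))
def pvLen (c : Int) : Int := PySem.Str.len (PySem.Int.toStr c)

theorem pvLen_eq (c : Int) (hc : 0 ≤ c) : pvLen c = (pvL c.toNat : Int) := by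
  unfold pvLen pvL PySem.Str.len PySem.Int.toStr PySem.Int.toChars
  simp [not_lt.mpr hc]

theorem pvLen_mono {a b : Int} (ha : 0 ≤ a) (hab : a ≤ b) : pvLen a ≤ pvLen b := by
  rw [pvLen_eq a ha, pvLen_eq b (le_trans ha hab)]
  exact_mod_cast pvL_mono b.toNat a.toNat (Int.toNat_le_toNat hab)

theorem pvLen_max {a b : Int} (ha : 0 ≤ a) (hb : 0 ≤ b) :
    pvLen (max a b) = max (pvLen a) (pvLen b) := by
  rcases le_total a b with h | h
  · rw [max_eq_right h, max_eq_right (pvLen_mono ha h)]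
  · rw [max_eq_left h, max_eq_left (pvLen_mono hb h)]

-- the inner accumulator step of port A
theorem pv_row (cs : List Int) : ∀ (m : Int), 0 ≤ m →
    cs.foldl (fun max_length cell =>
      if cell > 0 then max max_length (pvLen cell) else max_length) (max 1 (pvLen m))
      = max 1 (pvLen ((cs.filter (fun cell => cell > 0)).foldl max m)) := by
  induction cs with
  | nil => intro m _; rfl
  | cons c cs ih =>
    intro m hm
    by_cases hc : c > 0
    · simp only [List.foldl_cons, List.filter_cons, hc, if_true, decide_true]
      have : max (max 1 (pvLen m)) (pvLen c) = max 1 (pvLen (max m c)) := by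
        rw [pvLen_max hm (le_of_lt hc), max_assoc]
      rw [this]
      exact ih (max m c) (le_trans hm (le_max_left m c))
    · simp only [List.foldl_cons, List.filter_cons, hc, if_false, decide_false]
      exact ih m hm

theorem pv_board (rows : List (List Int)) : ∀ (m : Int), 0 ≤ m →
    rows.foldl (fun max_length row =>
      row.foldl (fun max_length cell =>
        if cell > 0 then max max_length (pvLen cell) else max_length) max_length)
      (max 1 (pvLen m))
      = max 1 (pvLen ((rows.flatMap (fun row => row.filter (fun cell => cell > 0))).foldl max m)) := by
  induction rows with
  | nil => intro m _; rfl
  | cons r rs ih =>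
    intro m hm
    simp only [List.foldl_cons, List.flatMap_cons, List.foldl_append]
    rw [pv_row r m hm]
    exact ih _ (le_trans hm (PySem.List.le_foldl_max (r.filter (fun cell => cell > 0)) m).1)

theorem pvLen_zero : pvLen 0 = 1 := by decide

-- ===== VERDICT (by name: the statement is the Claim_ definition above) =====
theorem get_max_digit_length_spec : Claim_equal_get_max_digit_length := by
  intro board _
  unfold Spec_get_max_digit_length get_max_digit_length get_max_digit_length_alt
  have h := pv_board board 0 le_rfl
  rw [pvLen_zero] at h
  simpa [pvLen] using h
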